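-- pv_equiv track=rewrite | github.com/GLion31023/LeetCode | problems/array_and_string/max_pal_after_operations.py | max_pal_after_operations
-- ===== SOURCE A (Python) =====
-- from collections import defaultdict
--
-- def max_pal_after_operations(words: list[str]) -> int:
--     chars = defaultdict(int)
--     len_words = []
--     max_num_of_pals = 0
--
--     for w in words:
--         len_words.append(len(w))
--         for c in w:
--             chars[c] += 1
--
--     len_words.sort(reverse=False)
--     single_chars_sum = 0
--     even_chars_sum = 0
--
--     for v in chars.values():
--         if v % 2 == 0:
--             even_chars_sum += v
--         else:
--             single_chars_sum += 1
--             if v > 1: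
--                 even_chars_sum += (v - 1)
--
--     for l in len_words:
--         if l % 2 == 0:
--             if even_chars_sum >= l:
--                 even_chars_sum -= l
--                 max_num_of_pals += 1
--         else:
--             if l > 2:
--                 single_chars_sum -= 1
--                 if even_chars_sum >= l - 1:
--                     even_chars_sum -= (l - 1)
--                     max_num_of_pals += 1
--             else:
--                 single_chars_sum -= 1
--                 max_num_of_pals += 1
--
--     return max_num_of_pals
-- ===== SOURCE B (Python) =====
-- def max_pal_after_operations(words: list[str]) -> int:
--     # Characters occurring an odd number of times, tracked by parity toggling
--     # (no counting dict at all); usable pool = total chars - #odd-parity chars.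
--     odd = set()
--     total_chars = 0
--     for w in words:
--         total_chars += len(w)
--         for c in w:
--             if c in odd:
--                 odd.discard(c)
--             else:
--                 odd.add(c)
--     pool = total_chars - len(odd)
--     # Start from "all words are palindromes" and drop the most expensive words
--     # (largest even need first) until the remaining total need fits the pool.
--     needs = sorted((len(w) - len(w) % 2 for w in words), reverse=True)
--     need_sum = sum(needs)
--     removed = 0
--     for need in needs:
--         if need_sum <= pool:
--             break
--         need_sum -= need
--         removed += 1
--     return len(words) - removed
-- ===== Notes on version B (the rewrite author's own statement) =====
-- stated objective: alternative
-- what changed: B drops A's frequency dict and branch-per-word greedy entirely: it tracks odd-count characters by parity-toggling a set (pool = total chars - #odd-parity chars), then works back-to-front, starting from all words counted and removing the largest even needs (descending sort, early break) until the remaining total need fits the pool, returning len(words) - removed.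
import Mathlib
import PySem

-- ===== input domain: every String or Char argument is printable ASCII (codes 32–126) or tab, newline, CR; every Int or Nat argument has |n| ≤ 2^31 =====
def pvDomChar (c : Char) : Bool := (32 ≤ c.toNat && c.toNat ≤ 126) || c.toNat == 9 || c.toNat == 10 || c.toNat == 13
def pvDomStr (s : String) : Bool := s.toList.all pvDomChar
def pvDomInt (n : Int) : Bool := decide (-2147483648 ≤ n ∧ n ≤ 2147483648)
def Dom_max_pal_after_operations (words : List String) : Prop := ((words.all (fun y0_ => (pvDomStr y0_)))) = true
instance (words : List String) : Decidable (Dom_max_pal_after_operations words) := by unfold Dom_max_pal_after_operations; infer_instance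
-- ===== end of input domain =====

-- B replaces A's frequency dict and branch-per-word greedy with a parity-toggled set of
-- odd-count characters (pool = total chars - #odd-parity chars) and a back-to-front loop
-- that removes the largest even needs until the rest fits; objective: alternative (same cost).

-- ===== PORT A =====
def max_pal_after_operations (words : List String) : Int :=
  let st := words.foldl
    (fun (st : PySem.Dict Char Int × List Int) w =>
      (w.toList.foldl (fun d c => d.modify c 0 (· + 1)) st.1,
       st.2 ++ [PySem.Str.len w]))
    (PySem.Dict.empty, [])
  let chars := st.1
  let len_words := PySem.List.sorted st.2 (fun x => x) false
  let sums := chars.values.foldl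
    (fun (p : Int × Int) v =>
      if PySem.Int.mod v 2 = 0 then (p.1, p.2 + v)
      else (p.1 + 1, if v > 1 then p.2 + (v - 1) else p.2))
    ((0 : Int), (0 : Int))
  let res := len_words.foldl
    (fun (q : Int × Int × Int) l =>
      if PySem.Int.mod l 2 = 0 then
        (if q.2.1 ≥ l then (q.1, q.2.1 - l, q.2.2 + 1) else q)
      else if l > 2 then
        (if q.2.1 ≥ l - 1 then (q.1 - 1, q.2.1 - (l - 1), q.2.2 + 1)
         else (q.1 - 1, q.2.1, q.2.2))
      else (q.1 - 1, q.2.1, q.2.2 + 1))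
    (sums.1, sums.2, (0 : Int))
  res.2.2

-- ===== PORT B =====
-- the body of the inner 'for c in w' loop of Source B (the parity toggle)
def pvTog (s : PySem.Set Char) (c : Char) : PySem.Set Char :=
  if PySem.Set.contains s c then PySem.Set.discard s c else PySem.Set.add s c

-- the 'for need in needs: if …: break; …' loop of Source B, returning the removed count
def pvLoopB (pool : Int) : Int → List Int → Int
  | _, [] => 0
  | s, n :: t => if s ≤ pool then 0 else 1 + pvLoopB pool (s - n) t

def max_pal_after_operations_alt (words : List String) : Int :=
  let st := words.foldl
    (fun (st : PySem.Set Char × Int) w =>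
      (w.toList.foldl pvTog st.1, st.2 + PySem.Str.len w))
    (PySem.Set.empty, (0 : Int))
  let pool := st.2 - PySem.Set.len st.1
  let needs := PySem.List.sorted
    (words.map (fun w => PySem.Str.len w - PySem.Int.mod (PySem.Str.len w) 2))
    (fun x => x) true
  let removed := pvLoopB pool needs.sum needs
  (words.length : Int) - removed

-- ===== PRECONDITION & SPEC =====
def Spec_max_pal_after_operations (words : List String) (out : Int) : Prop := out = max_pal_after_operations_alt words
instance (words : List String) (out : Int) : Decidable (Spec_max_pal_after_operations words out) := by unfold Spec_max_pal_after_operations; infer_instance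

-- ===== CLAIM (what is proved, stated in full; the proofs are below) =====
def Claim_equal_max_pal_after_operations : Prop := ∀ (words : List String), Dom_max_pal_after_operations words → Spec_max_pal_after_operations words (max_pal_after_operations words)

-- ===== LEMMAS AND PROOFS =====

-- per-word need / per-character usable pool function
def pvF (l : Int) : Int := l - PySem.Int.mod l 2

-- prefix sums of a list
def pvPfx : List Int → List Int
  | [] => []
  | n :: ns => n :: (pvPfx ns).map (n + ·)

-- abstract greedy: take an item when its need fits the remaining pool
def pvG : Int → List Int → Int
  | _, [] => 0
  | e, n :: ns => if n ≤ e then 1 + pvG (e - n) ns else pvG e ns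

-- the common normal form of both programs
def pvCnt (e : Int) (a : List Int) : Int := ((pvPfx a).countP (fun s => s ≤ e) : Nat)

-- A's pool and the ascending even-need list
def pvPoolA (words : List String) : Int :=
  (((PySem.Dict.counter (words.flatMap String.toList)).values).map
    (fun v => v - PySem.Int.mod v 2)).sum

def pvAsc (words : List String) : List Int :=
  (PySem.List.sorted (words.map PySem.Str.len) (fun x => x) false).map pvF

theorem pvF_nonneg {l : Int} (h : 0 ≤ l) : 0 ≤ pvF l := by
  simp only [pvF, PySem.Int.mod_eq_emod_of_pos (by norm_num : (0:Int) < 2)]; omega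

theorem pvF_mono {a b : Int} (h : a ≤ b) : pvF a ≤ pvF b := by
  simp only [pvF, PySem.Int.mod_eq_emod_of_pos (by norm_num : (0:Int) < 2)]; omega

theorem pvPfx_lb (ns : List Int) (h : ∀ n ∈ ns, 0 ≤ n) :
    ∀ x ∈ pvPfx ns, 0 ≤ x ∧ ∃ m ∈ ns, m ≤ x := by
  induction ns with
  | nil => simp [pvPfx]
  | cons n t ih =>
    intro x hx
    have hn : 0 ≤ n := h n (by simp)
    have ht : ∀ m ∈ t, 0 ≤ m := fun m hm => h m (by simp [hm])
    simp only [pvPfx, List.mem_cons, List.mem_map] at hx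
    rcases hx with h0 | ⟨y, hy, rfl⟩
    · subst h0; exact ⟨hn, x, by simp, le_rfl⟩
    · obtain ⟨hy0, m, hm, hmy⟩ := ih ht y hy
      exact ⟨by omega, n, by simp, by omega⟩

theorem pvG_eq_count (ns : List Int) : ∀ e : Int, (∀ n ∈ ns, 0 ≤ n) → ns.Pairwise (· ≤ ·) →
    pvG e ns = ((pvPfx ns).countP (fun s => s ≤ e) : Int) := by
  induction ns with
  | nil => intro e _ _; simp [pvG, pvPfx]
  | cons n t ih =>
    intro e hnn hpw
    have ht : ∀ m ∈ t, 0 ≤ m := fun m hm => hnn m (by simp [hm])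
    have hmono : ∀ m ∈ t, n ≤ m := fun m hm => (List.pairwise_cons.mp hpw).1 m hm
    have hpt : t.Pairwise (· ≤ ·) := (List.pairwise_cons.mp hpw).2
    by_cases h : n ≤ e
    · have hfun : ((fun s => decide (s ≤ e)) ∘ (n + ·)) = (fun x => decide (x ≤ e - n)) := by
        funext x; simp only [Function.comp]; rw [decide_eq_decide]; omega
      rw [show pvG e (n :: t) = 1 + pvG (e - n) t from by simp [pvG, h], ih (e - n) ht hpt]
      simp only [pvPfx, List.countP_cons, List.countP_map, hfun, h, decide_true]
      push_cast; ring
    · have hz1 : (pvPfx t).countP (fun s => decide (s ≤ e)) = 0 := by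
        rw [List.countP_eq_zero]
        intro a ha
        obtain ⟨ha0, m, hm, hma⟩ := pvPfx_lb t ht a ha
        have := hmono m hm
        simp only [decide_eq_true_eq]
        omega
      have hz2 : (pvPfx t).countP ((fun s => decide (s ≤ e)) ∘ (n + ·)) = 0 := by
        rw [List.countP_eq_zero]
        intro a ha
        obtain ⟨ha0, -⟩ := pvPfx_lb t ht a ha
        simp only [Function.comp, decide_eq_true_eq]
        omega
      rw [show pvG e (n :: t) = pvG e t from by simp [pvG, h], ih e ht hpt, hz1]
      simp only [pvPfx, List.countP_cons, List.countP_map, hz2, h, decide_false]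
      simp

theorem pvSums_snd (vs : List Int) : ∀ s e : Int, (∀ v ∈ vs, 0 ≤ v) →
    (vs.foldl (fun (p : Int × Int) v =>
      if PySem.Int.mod v 2 = 0 then (p.1, p.2 + v)
      else (p.1 + 1, if v > 1 then p.2 + (v - 1) else p.2)) (s, e)).2
    = e + (vs.map (fun v => v - PySem.Int.mod v 2)).sum := by
  induction vs with
  | nil => intro s e _; simp
  | cons v t ih =>
    intro s e hnn
    have hv : 0 ≤ v := hnn v (by simp)
    have ht : ∀ u ∈ t, 0 ≤ u := fun u hu => hnn u (by simp [hu])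
    have hm : PySem.Int.mod v 2 = v % 2 := PySem.Int.mod_eq_emod_of_pos (by norm_num)
    simp only [List.foldl_cons, List.map_cons, List.sum_cons]
    by_cases h : PySem.Int.mod v 2 = 0
    · rw [if_pos h, ih _ _ ht]; rw [hm] at h ⊢; omega
    · rw [if_neg h]
      by_cases h1 : v > 1
      · rw [if_pos h1, ih _ _ ht]; rw [hm] at h ⊢; omega
      · rw [if_neg h1, ih _ _ ht]; rw [hm] at h ⊢; omega

theorem pvLoopA (ls : List Int) : ∀ (s e c : Int), 0 ≤ e → (∀ l ∈ ls, 0 ≤ l) →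
    (ls.foldl (fun (q : Int × Int × Int) l =>
      if PySem.Int.mod l 2 = 0 then
        (if q.2.1 ≥ l then (q.1, q.2.1 - l, q.2.2 + 1) else q)
      else if l > 2 then
        (if q.2.1 ≥ l - 1 then (q.1 - 1, q.2.1 - (l - 1), q.2.2 + 1)
         else (q.1 - 1, q.2.1, q.2.2))
      else (q.1 - 1, q.2.1, q.2.2 + 1)) (s, e, c)).2.2
    = c + pvG e (ls.map pvF) := by
  induction ls with
  | nil => intro s e c _ _; simp [pvG]
  | cons l t ih =>
    intro s e c he hnn
    have hl : 0 ≤ l := hnn l (by simp)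
    have ht : ∀ u ∈ t, 0 ≤ u := fun u hu => hnn u (by simp [hu])
    have hm : PySem.Int.mod l 2 = l % 2 := PySem.Int.mod_eq_emod_of_pos (by norm_num)
    simp only [List.foldl_cons, List.map_cons]
    by_cases h : PySem.Int.mod l 2 = 0
    · have hfl : pvF l = l := by simp only [pvF, h, sub_zero]
      by_cases hc : e ≥ l
      · rw [if_pos h, if_pos hc, ih _ _ _ (by omega) ht, hfl]
        simp only [pvG, if_pos (ge_iff_le.mp hc)]
        ring
      · rw [if_pos h, if_neg hc, ih _ _ _ he ht, hfl]
        simp only [pvG, if_neg (by omega : ¬ l ≤ e)]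
    · have h1 : l % 2 = 1 := by rw [hm] at h; omega
      have hfl : pvF l = l - 1 := by unfold pvF; rw [hm, h1]
      by_cases h2 : l > 2
      · by_cases hc : e ≥ l - 1
        · rw [if_neg h, if_pos h2, if_pos hc, ih _ _ _ (by omega) ht, hfl]
          simp only [pvG, if_pos (ge_iff_le.mp hc)]
          ring
        · rw [if_neg h, if_pos h2, if_neg hc, ih _ _ _ he ht, hfl]
          simp only [pvG, if_neg (by omega : ¬ l - 1 ≤ e)]
      · rw [if_neg h, if_neg h2, ih _ _ _ he ht, hfl,
           show l - 1 = (0 : Int) from by omega]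
        simp only [pvG, if_pos he, sub_zero]
        ring

theorem pvCounterValuesNonneg (xs : List Char) : ∀ v ∈ (PySem.Dict.counter xs).values, 0 ≤ v := by
  intro v hv
  have hval : (PySem.Dict.counter xs).values
      = (PySem.Set.ofList xs).map (fun k => ((List.count k xs : Nat) : Int)) := by
    simp only [PySem.Dict.values, PySem.Dict.items_counter, List.map_map]; rfl
  rw [hval] at hv
  obtain ⟨k, -, rfl⟩ := List.mem_map.mp hv
  exact Int.natCast_nonneg _

theorem pvSortedMap (lens : List Int) :
    PySem.List.sorted (lens.map pvF) (fun x => x) false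
      = (PySem.List.sorted lens (fun x => x) false).map pvF := by
  apply PySem.List.sorted_id_eq_of_perm_of_pairwise
  · exact (PySem.List.sorted_perm lens (fun x => x) false).map pvF
  · exact (PySem.List.sorted_pairwise lens (fun x => x)).map pvF
      (fun a b hab => pvF_mono hab)

theorem pvAscNonneg (words : List String) : ∀ n ∈ pvAsc words, 0 ≤ n := by
  intro n hn
  obtain ⟨l, hl, rfl⟩ := List.mem_map.mp hn
  apply pvF_nonneg
  have := (PySem.List.sorted_perm (words.map PySem.Str.len) (fun x => x) false).mem_iff.mp hl
  obtain ⟨w, -, rfl⟩ := List.mem_map.mp this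
  simp [PySem.Str.len_eq]

theorem pvAscPairwise (words : List String) : (pvAsc words).Pairwise (· ≤ ·) :=
  (PySem.List.sorted_pairwise (words.map PySem.Str.len) (fun x => x)).map pvF
    (fun _ _ hab => pvF_mono hab)

theorem pvPoolNonneg (vs : List Int) (h : ∀ v ∈ vs, 0 ≤ v) :
    0 ≤ (vs.map (fun v => v - PySem.Int.mod v 2)).sum := by
  apply List.sum_nonneg
  intro x hx
  obtain ⟨v, hv, rfl⟩ := List.mem_map.mp hx
  have := h v hv
  rw [PySem.Int.mod_eq_emod_of_pos (by norm_num : (0:Int) < 2)]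
  omega

-- length of the prefix-sum list
theorem pvPfx_length (a : List Int) : (pvPfx a).length = a.length := by
  induction a with
  | nil => rfl
  | cons x t ih => simp [pvPfx, ih]

-- sum of a pointwise difference
theorem pvSum_sub (l : List Int) (f g : Int → Int) :
    (l.map (fun v => f v - g v)).sum = (l.map f).sum - (l.map g).sum := by
  induction l with
  | nil => simp
  | cons x t ih => simp [ih]; ring

-- A's result in the common normal form
theorem pvA_eq (words : List String) :
    max_pal_after_operations words = pvCnt (pvPoolA words) (pvAsc words) := by
  simp only [max_pal_after_operations]
  have hsplit : (words.foldl (fun (st : PySem.Dict Char Int × List Int) w =>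
        (w.toList.foldl (fun d c => d.modify c 0 (· + 1)) st.1, st.2 ++ [PySem.Str.len w]))
        (PySem.Dict.empty, ([] : List Int)))
      = (words.foldl (fun (d : PySem.Dict Char Int) (w : String) => w.toList.foldl (fun d c => d.modify c 0 (· + 1)) d)
           PySem.Dict.empty,
         words.foldl (fun (l : List Int) (w : String) => l ++ [PySem.Str.len w]) []) :=
    PySem.List.foldl_prod_mk
      (fun (d : PySem.Dict Char Int) (w : String) => w.toList.foldl (fun d c => d.modify c 0 (· + 1)) d)
      (fun (l : List Int) (w : String) => l ++ [PySem.Str.len w]) words PySem.Dict.empty []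
  rw [hsplit]
  rw [show (words.foldl (fun d (w : String) =>
        w.toList.foldl (fun d c => d.modify c 0 (· + 1)) d) PySem.Dict.empty)
      = PySem.Dict.counter (words.flatMap String.toList) from by
        rw [PySem.Dict.counter_eq_foldl, List.foldl_flatMap]]
  rw [PySem.List.foldl_append_singleton_eq_map PySem.Str.len words []]
  set vs := (PySem.Dict.counter (words.flatMap String.toList)).values with hvs
  set lens := words.map PySem.Str.len with hlens
  have hvnn : ∀ v ∈ vs, 0 ≤ v := pvCounterValuesNonneg _
  have hlnn : ∀ l ∈ lens, 0 ≤ l := by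
    intro l hl
    obtain ⟨w, -, rfl⟩ := List.mem_map.mp hl
    simp [PySem.Str.len_eq]
  set L := PySem.List.sorted lens (fun x => x) false with hL
  have hLnn : ∀ l ∈ L, 0 ≤ l := fun l hl =>
    hlnn l ((PySem.List.sorted_perm lens (fun x => x) false).mem_iff.mp hl)
  rw [pvSums_snd vs 0 0 hvnn]
  simp only [List.nil_append]
  rw [pvLoopA L _ _ 0 (by simpa using pvPoolNonneg vs hvnn) hLnn,
      pvG_eq_count (L.map pvF) _ (pvAscNonneg words) (pvAscPairwise words)]
  simp only [zero_add]
  rfl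

-- prefix sums of a snoc
theorem pvPfx_snoc (a : List Int) (n : Int) : pvPfx (a ++ [n]) = pvPfx a ++ [a.sum + n] := by
  induction a with
  | nil => simp [pvPfx]
  | cons x t ih =>
    simp only [List.cons_append, pvPfx, ih, List.map_append, List.sum_cons]
    simp [add_assoc]

theorem pvPfx_le_sum (a : List Int) (h : ∀ n ∈ a, 0 ≤ n) : ∀ x ∈ pvPfx a, x ≤ a.sum := by
  induction a with
  | nil => simp [pvPfx]
  | cons n t ih =>
    intro x hx
    have ht : ∀ m ∈ t, 0 ≤ m := fun m hm => h m (by simp [hm])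
    have hts : 0 ≤ t.sum := List.sum_nonneg ht
    simp only [pvPfx, List.mem_cons, List.mem_map] at hx
    simp only [List.sum_cons]
    rcases hx with rfl | ⟨y, hy, rfl⟩
    · omega
    · have := ih ht y hy; omega

-- removing the largest needs from the back = counting fitting prefix sums from the front
theorem pvLoopB_eq (d : List Int) (pool : Int) (h : ∀ n ∈ d, 0 ≤ n) :
    (d.length : Int) - pvLoopB pool d.sum d = pvCnt pool d.reverse := by
  induction d with
  | nil => simp [pvLoopB, pvCnt, pvPfx]
  | cons n t ih =>
    have ht : ∀ m ∈ t, 0 ≤ m := fun m hm => h m (by simp [hm])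
    have hn : 0 ≤ n := h n (by simp)
    have hrs : t.reverse.sum = t.sum := by simp
    simp only [List.reverse_cons, List.sum_cons, pvLoopB]
    by_cases hc : n + t.sum ≤ pool
    · rw [if_pos hc]
      have hall : (pvPfx (t.reverse ++ [n])).countP (fun s => s ≤ pool)
          = (pvPfx (t.reverse ++ [n])).length := by
        apply List.countP_eq_length.mpr
        intro x hx
        have hle : ∀ y ∈ pvPfx (t.reverse ++ [n]), y ≤ (t.reverse ++ [n]).sum :=
          pvPfx_le_sum _ (by
            intro m hm
            rcases List.mem_append.mp hm with hm | hm
            · exact ht m (List.mem_reverse.mp hm)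
            · simp only [List.mem_singleton] at hm; omega)
        have := hle x hx
        simp only [List.sum_append, List.sum_cons, List.sum_nil, hrs] at this
        simp only [decide_eq_true_eq]
        omega
      unfold pvCnt
      rw [hall, pvPfx_length]
      simp
    · rw [if_neg hc]
      have hih := ih ht
      have hx : n + t.sum - n = t.sum := by ring
      rw [hx]
      unfold pvCnt at hih ⊢
      rw [pvPfx_snoc, List.countP_append, hrs]
      have hone : List.countP (fun s => decide (s ≤ pool)) [t.sum + n] = 0 := by
        simp only [List.countP_singleton, decide_eq_true_eq]
        rw [if_neg (by omega)]
      rw [hone, List.length_cons]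
      push_cast at hih ⊢
      omega

theorem pvTog_fold (xs : List Char) : ∀ S : PySem.Set Char, S.Nodup →
    (xs.foldl pvTog S).Nodup ∧
    ∀ c, c ∈ xs.foldl pvTog S ↔ ((c ∈ S) ↔ xs.count c % 2 = 0) := by
  induction xs with
  | nil =>
    intro S hS
    refine ⟨hS, fun c => ?_⟩
    simp
  | cons x t ih =>
    intro S hS
    have hstep : (pvTog S x).Nodup := by
      unfold pvTog
      split
      · exact PySem.Set.nodup_discard S x hS
      · exact PySem.Set.nodup_add S x hS
    have hmem : ∀ c, c ∈ pvTog S x ↔ (if c = x then c ∉ S else c ∈ S) := by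
      intro c
      unfold pvTog
      by_cases hx : x ∈ S
      · rw [if_pos ((PySem.Set.contains_iff S x).mpr hx), PySem.Set.mem_discard]
        by_cases hcx : c = x
        · subst hcx; simp [hx]
        · simp [hcx]
      · have hcon : ¬ (PySem.Set.contains S x = true) := fun hf =>
          hx ((PySem.Set.contains_iff S x).mp hf)
        rw [if_neg hcon, PySem.Set.mem_add]
        by_cases hcx : c = x
        · subst hcx; simp [hx]
        · simp [hcx]
    obtain ⟨hn, hm⟩ := ih (pvTog S x) hstep
    refine ⟨hn, fun c => ?_⟩
    simp only [List.foldl_cons]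
    rw [hm c, hmem c, List.count_cons]
    by_cases hcx : c = x
    · subst hcx
      simp only [beq_self_eq_true, if_true]
      by_cases hcs : c ∈ S <;>
        rcases Nat.mod_two_eq_zero_or_one (List.count c t) with hk | hk <;>
        simp [hcs, hk, Nat.succ_mod_two_eq_zero_iff]
    · have hxc : ¬ x = c := fun h => hcx h.symm
      simp [hcx, hxc]

-- B's toggled set holds exactly the odd-count characters, without duplicates
theorem pvOddSet (xs : List Char) :
    (xs.foldl pvTog PySem.Set.empty).Nodup ∧
    ∀ c, c ∈ xs.foldl pvTog PySem.Set.empty ↔ xs.count c % 2 = 1 := by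
  obtain ⟨hn, hm⟩ := pvTog_fold xs PySem.Set.empty (by simp [PySem.Set.empty])
  refine ⟨hn, fun c => ?_⟩
  rw [hm c]
  simp only [PySem.Set.empty, List.not_mem_nil, false_iff]
  constructor
  · intro h; omega
  · intro h; omega

-- sum of a counter's values is the length of the counted list
theorem pvCounterSum (xs : List Char) :
    ((PySem.Dict.counter xs).values).sum = (xs.length : Int) := by
  have hval : (PySem.Dict.counter xs).values
      = (PySem.Set.ofList xs).map (fun k => ((List.count k xs : Nat) : Int)) := by
    simp only [PySem.Dict.values, PySem.Dict.items_counter, List.map_map]; rfl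
  have hperm : (PySem.Set.ofList xs).Perm xs.dedup := by
    rw [List.perm_ext_iff_of_nodup (PySem.Set.nodup_ofList xs) xs.nodup_dedup]
    intro a
    rw [PySem.Set.mem_ofList, List.mem_dedup]
  rw [hval,
      show (PySem.Set.ofList xs).map (fun k => ((List.count k xs : Nat) : Int))
         = ((PySem.Set.ofList xs).map (fun k => List.count k xs)).map (fun n : Nat => (n : Int))
        from by rw [List.map_map]; rfl,
      ← Nat.cast_list_sum, (hperm.map (fun k => List.count k xs)).sum_eq,
      List.sum_map_count_dedup_eq_length]

-- A's pool equals B's pool: total characters minus number of odd-count characters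
theorem pvPool_eq (xs : List Char) :
    (((PySem.Dict.counter xs).values).map (fun v => v - PySem.Int.mod v 2)).sum
      = (xs.length : Int) - PySem.Set.len (xs.foldl pvTog PySem.Set.empty) := by
  have hval : (PySem.Dict.counter xs).values
      = (PySem.Set.ofList xs).map (fun k => ((List.count k xs : Nat) : Int)) := by
    simp only [PySem.Dict.values, PySem.Dict.items_counter, List.map_map]; rfl
  rw [pvSum_sub]
  simp only [List.map_id']
  rw [pvCounterSum]
  have hmods : (((PySem.Dict.counter xs).values).map (fun v => PySem.Int.mod v 2)).sum
      = (((PySem.Set.ofList xs)).countP (fun k => decide (List.count k xs % 2 = 1)) : Int) := by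
    rw [hval, List.map_map]
    rw [show ((fun v => PySem.Int.mod v 2) ∘ fun k => ((List.count k xs : Nat) : Int))
          = (fun k => if (fun k => decide (List.count k xs % 2 = 1)) k = true then (1:Int) else 0) from by
        funext k
        simp only [Function.comp]
        rw [show (2:Int) = ((2:Nat):Int) from rfl, PySem.Int.mod_natCast]
        rcases Nat.mod_two_eq_zero_or_one (List.count k xs) with h | h <;> simp [h]]
    exact PySem.List.sum_map_ite_one_zero (fun k => decide (List.count k xs % 2 = 1)) _
  rw [hmods]
  obtain ⟨hnd, hm⟩ := pvOddSet xs
  have hperm : (xs.foldl pvTog PySem.Set.empty).Perm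
      ((PySem.Set.ofList xs).filter (fun k => decide (List.count k xs % 2 = 1))) := by
    rw [List.perm_ext_iff_of_nodup hnd ((PySem.Set.nodup_ofList xs).filter _)]
    intro a
    rw [hm a, List.mem_filter, PySem.Set.mem_ofList]
    constructor
    · intro h
      refine ⟨?_, by simp [h]⟩
      have : 0 < List.count a xs := by omega
      exact List.count_pos_iff.mp this
    · intro ⟨_, h⟩
      simpa using h
  rw [show PySem.Set.len (xs.foldl pvTog PySem.Set.empty)
        = ((xs.foldl pvTog PySem.Set.empty).length : Int) from rfl,
      hperm.length_eq, ← List.countP_eq_length_filter]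

-- descending sort is the reverse of ascending sort (Int, identity key)
theorem pvSortDesc (xs : List Int) :
    PySem.List.sorted xs (fun x => x) true = (PySem.List.sorted xs (fun x => x) false).reverse := by
  apply List.Perm.eq_of_pairwise (le := fun a b : Int => b ≤ a)
  · intro a b _ _ h1 h2; omega
  · exact PySem.List.sorted_pairwise_rev xs (fun x => x)
  · exact List.pairwise_reverse.mpr (PySem.List.sorted_pairwise xs (fun x => x))
  · exact ((PySem.List.sorted_perm xs (fun x => x) true).trans
      ((PySem.List.sorted_perm xs (fun x => x) false).symm.trans
        (List.reverse_perm _).symm))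

theorem pvMain (words : List String) :
    max_pal_after_operations words = max_pal_after_operations_alt words := by
  rw [pvA_eq]
  simp only [max_pal_after_operations_alt]
  rw [PySem.List.foldl_prod_mk
      (fun (s : PySem.Set Char) (w : String) => w.toList.foldl pvTog s)
      (fun (acc : Int) (w : String) => acc + PySem.Str.len w) words PySem.Set.empty 0]
  rw [← List.foldl_flatMap (f := String.toList) (g := pvTog) (l := words)
        (init := PySem.Set.empty)]
  rw [PySem.List.foldl_add words PySem.Str.len 0]
  have hlensum : (words.map PySem.Str.len).sum = ((words.flatMap String.toList).length : Int) := by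
    rw [List.length_flatMap]
    rw [show words.map PySem.Str.len = (words.map (fun a => a.toList.length)).map (fun n : Nat => (n : Int)) from by
      rw [List.map_map]
      apply List.map_congr_left
      intro w _
      simp [PySem.Str.len_eq]]
    rw [← Nat.cast_list_sum]
  have hpool : (words.map PySem.Str.len).sum
        - PySem.Set.len ((words.flatMap String.toList).foldl pvTog PySem.Set.empty)
      = pvPoolA words := by
    rw [hlensum, pvPoolA, pvPool_eq]
  have hneeds : PySem.List.sorted
        (words.map (fun w => PySem.Str.len w - PySem.Int.mod (PySem.Str.len w) 2))
        (fun x => x) true = (pvAsc words).reverse := by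
    rw [show words.map (fun w => PySem.Str.len w - PySem.Int.mod (PySem.Str.len w) 2)
          = (words.map PySem.Str.len).map pvF from by rw [List.map_map]; rfl]
    rw [pvSortDesc, pvSortedMap]
    rfl
  simp only [zero_add, hpool, hneeds]
  have hnn : ∀ n ∈ (pvAsc words).reverse, 0 ≤ n := fun n hn =>
    pvAscNonneg words n (List.mem_reverse.mp hn)
  have hlen : ((pvAsc words).reverse.length : Int) = (words.length : Int) := by
    simp [pvAsc, PySem.List.length_sorted]
  rw [← hlen, pvLoopB_eq _ _ hnn, List.reverse_reverse]

-- ===== VERDICT (by name: the statement is the Claim_ definition above) =====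
theorem max_pal_after_operations_spec : Claim_equal_max_pal_after_operations := by
  intro words _
  unfold Spec_max_pal_after_operations
  exact pvMain words
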